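-- pv_equiv track=rewrite | github.com/gcgov/sipxecs-voicemail-transcription | vrmilter.py | split_body_pieces
-- ===== SOURCE A (Python) =====
-- def split_body_pieces(body):
--     """Take the entire body (as a real string) provided by the milter class
--        and divide it into it's content type pieces
--        return an array of strings
--     """
--     first_piece = True
--     lines = []
--     for byteline in body.split("\r\n"):
--         line = str(byteline)
--         if line.startswith("------=_Part_"):
--             if first_piece:
--                 first_piece = False
--             else:
--                 data = '\n'.join(lines)
--                 yield data
--                 del data
--                 lines = []
--         lines.append(line)
--     if len(lines) > 0:
--         yield '\r\n'.join(lines)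
-- ===== SOURCE B (Python) =====
-- def split_body_pieces(body):
--     """Take the entire body (as a real string) provided by the milter class
--        and divide it into it's content type pieces
--        return an array of strings
--     """
--     lines = body.split("\r\n")
--     # split points: every boundary line's index except the first boundary
--     # (any preamble merges with the first segment)
--     splits = [i for i, line in enumerate(lines)
--               if line.startswith("------=_Part_")][1:]
--     start = 0
--     for sp in splits:
--         yield '\n'.join(lines[start:sp])
--         start = sp
--     yield '\r\n'.join(lines[start:])
-- ===== Notes on version B (the rewrite author's own statement) =====
-- stated objective: alternative
-- what changed: Replaces A's single-pass generator with mutable accumulator and first-piece flag by an index-based decomposition: materialize the line list, compute the boundary-line indices once, and slice the list at every boundary after the first, joining intermediate slices with LF and the final slice with CRLF.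
import Mathlib
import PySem

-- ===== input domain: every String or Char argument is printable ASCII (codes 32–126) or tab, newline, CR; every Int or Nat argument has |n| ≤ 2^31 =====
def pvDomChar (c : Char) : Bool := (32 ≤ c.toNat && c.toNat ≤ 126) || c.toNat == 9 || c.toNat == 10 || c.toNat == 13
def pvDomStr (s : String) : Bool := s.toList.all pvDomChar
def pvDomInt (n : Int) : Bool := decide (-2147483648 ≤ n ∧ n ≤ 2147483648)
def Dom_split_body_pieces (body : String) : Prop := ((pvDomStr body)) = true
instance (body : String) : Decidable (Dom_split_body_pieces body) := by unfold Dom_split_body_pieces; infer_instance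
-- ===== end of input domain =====

-- B replaces A's single-pass accumulator/first-piece-flag generator by an index-based
-- decomposition (boundary indices computed once, then slicing); objective: alternative.

-- ===== PORT A =====
-- one step of A's for-loop; state = (first_piece, lines, yielded-so-far)
def pvAStep (st : Bool × List String × List String) (line : String) : Bool × List String × List String :=
  if PySem.Str.startswith line "------=_Part_" then
    if st.1 then (false, st.2.1 ++ [line], st.2.2)
    else (false, [line], st.2.2 ++ [PySem.Str.join "\n" st.2.1])
  else (st.1, st.2.1 ++ [line], st.2.2)

def split_body_pieces (body : String) : List String :=
  -- body.split("\r\n"): the separator is the nonempty literal "\r\n", so split? is always `some`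
  let st := ((PySem.Str.split? body "\r\n").getD []).foldl pvAStep (true, [], [])
  if st.2.1.length > 0 then st.2.2 ++ [PySem.Str.join "\r\n" st.2.1] else st.2.2

-- ===== PORT B =====
-- the for-loop over split points; yields lines[start:sp] joined by '\n', finally lines[start:]
def pvBEmit (lines : List String) (start : Int) : List Int → List String
  | [] => [PySem.Str.join "\r\n" (PySem.List.slice lines (some start) none)]
  | sp :: sps => PySem.Str.join "\n" (PySem.List.slice lines (some start) (some sp)) :: pvBEmit lines sp sps

def split_body_pieces_alt (body : String) : List String :=
  let lines := (PySem.Str.split? body "\r\n").getD []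
  let splits := PySem.List.slice
    (((PySem.List.enumerate lines).filter
        (fun p => PySem.Str.startswith p.2 "------=_Part_")).map (fun p => p.1))
    (some 1) none
  pvBEmit lines 0 splits

-- ===== PRECONDITION & SPEC =====
def Spec_split_body_pieces (body : String) (out : List String) : Prop := out = split_body_pieces_alt body
instance (body : String) (out : List String) : Decidable (Spec_split_body_pieces body out) := by unfold Spec_split_body_pieces; infer_instance

-- ===== CLAIM (what is proved, stated in full; the proofs are below) =====
def Claim_equal_split_body_pieces : Prop := ∀ (body : String), Dom_split_body_pieces body → Spec_split_body_pieces body (split_body_pieces body)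

-- ===== LEMMAS AND PROOFS =====

-- proof-side vocabulary
def pvIsB (l : String) : Bool := PySem.Str.startswith l "------=_Part_"

def pvNatIdxs : Nat → List String → List Nat
  | _, [] => []
  | s, l :: rest => if pvIsB l then s :: pvNatIdxs (s+1) rest else pvNatIdxs (s+1) rest

def pvEmitN (lines : List String) : Nat → List Nat → List String
  | start, [] => [PySem.Str.join "\r\n" (lines.drop start)]
  | start, sp :: sps => PySem.Str.join "\n" ((lines.drop start).take (sp - start)) :: pvEmitN lines sp sps

def pvSpecGo : List String → List String → List String
  | acc, [] => [PySem.Str.join "\r\n" acc]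
  | acc, l :: rest => if pvIsB l then PySem.Str.join "\n" acc :: pvSpecGo [l] rest else pvSpecGo (acc ++ [l]) rest

def pvSpecTrue : List String → List String → List String
  | acc, [] => if acc.length > 0 then [PySem.Str.join "\r\n" acc] else []
  | acc, l :: rest => if pvIsB l then pvSpecGo (acc ++ [l]) rest else pvSpecTrue (acc ++ [l]) rest

def pvFin (st : Bool × List String × List String) : List String :=
  if st.2.1.length > 0 then st.2.2 ++ [PySem.Str.join "\r\n" st.2.1] else st.2.2

-- A-side characterization
theorem pvAStep_eq (st : Bool × List String × List String) (line : String) :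
    pvAStep st line =
      (if pvIsB line then
        if st.1 then (false, st.2.1 ++ [line], st.2.2)
        else (false, [line], st.2.2 ++ [PySem.Str.join "\n" st.2.1])
      else (st.1, st.2.1 ++ [line], st.2.2)) := rfl

theorem pvA_false (rest : List String) : ∀ (acc out : List String), acc ≠ [] →
    pvFin (rest.foldl pvAStep (false, acc, out)) = out ++ pvSpecGo acc rest := by
  induction rest with
  | nil =>
    intro acc out h
    simp [pvFin, pvSpecGo, List.length_pos_iff, h]
  | cons l rest ih =>
    intro acc out h
    rw [List.foldl_cons, pvAStep_eq]
    cases hb : pvIsB l with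
    | true =>
      simp only [if_true, Bool.false_eq_true, if_false]
      rw [ih [l] (out ++ [PySem.Str.join "\n" acc]) (by simp)]
      simp only [pvSpecGo, hb, if_true, List.append_assoc, List.singleton_append]
    | false =>
      simp only [Bool.false_eq_true, if_false]
      rw [ih (acc ++ [l]) out (by simp)]
      simp only [pvSpecGo, hb, Bool.false_eq_true, if_false]

theorem pvA_true (rest : List String) : ∀ (acc out : List String),
    pvFin (rest.foldl pvAStep (true, acc, out)) = out ++ pvSpecTrue acc rest := by
  induction rest with
  | nil =>
    intro acc out
    by_cases h : acc = [] <;> simp [pvFin, pvSpecTrue, h, List.length_pos_iff]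
  | cons l rest ih =>
    intro acc out
    rw [List.foldl_cons, pvAStep_eq]
    cases hb : pvIsB l with
    | true =>
      simp only [if_true]
      rw [pvA_false rest (acc ++ [l]) out (by simp)]
      simp only [pvSpecTrue, hb, if_true]
    | false =>
      simp only [Bool.false_eq_true, if_false]
      rw [ih (acc ++ [l]) out]
      simp only [pvSpecTrue, hb, Bool.false_eq_true, if_false]

-- B-side: indices computed by enumerate+filter are pvNatIdxs, as Int casts
theorem pvIdx_cast (rest : List String) : ∀ (s : Nat),
    (((PySem.List.enumerate rest (s : Int)).filter (fun p => pvIsB p.2)).map (fun p => p.1))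
      = (pvNatIdxs s rest).map (Nat.cast) := by
  induction rest with
  | nil => intro s; simp [PySem.List.enumerate_nil, pvNatIdxs]
  | cons l rest ih =>
    intro s
    rw [PySem.List.enumerate_cons]
    by_cases hb : pvIsB l
    · have := ih (s + 1)
      push_cast at this
      simp [pvNatIdxs, hb, this]
    · have := ih (s + 1)
      push_cast at this
      simp [pvNatIdxs, hb, this]

-- B-side: pvBEmit over cast indices is the Nat-level pvEmitN
theorem pvEmit_cast (sps : List Nat) : ∀ (lines : List String) (start : Nat),
    pvBEmit lines (start : Int) (sps.map (Nat.cast)) = pvEmitN lines start sps := by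
  induction sps with
  | nil => intro lines start; simp [pvBEmit, pvEmitN, PySem.List.slice_from_natCast]
  | cons sp sps ih =>
    intro lines start
    rw [List.map_cons, pvBEmit, pvEmitN, PySem.List.slice_natCast, ih]

-- pvEmitN only looks at the suffix from `start`
theorem pvEmit_shift (sps : List Nat) : ∀ (lines : List String) (d s : Nat),
    pvEmitN lines (d + s) (sps.map (· + d)) = pvEmitN (lines.drop d) s sps := by
  induction sps with
  | nil =>
    intro lines d s
    simp [pvEmitN, List.drop_drop, Nat.add_comm]
  | cons sp sps ih =>
    intro lines d s
    rw [List.map_cons, pvEmitN, pvEmitN, List.drop_drop]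
    rw [show sp + d - (d + s) = sp - s by omega, ← ih lines d sp, Nat.add_comm sp d]

theorem pvNatIdxs_add (rest : List String) : ∀ (s d : Nat),
    pvNatIdxs (s + d) rest = (pvNatIdxs s rest).map (· + d) := by
  induction rest with
  | nil => intro s d; simp [pvNatIdxs]
  | cons l rest ih =>
    intro s d
    by_cases hb : pvIsB l
    · simp only [pvNatIdxs, hb, if_true]
      rw [show s + d + 1 = (s + 1) + d by omega, ih (s+1) d]
      simp
    · simp only [pvNatIdxs, hb, if_false, Bool.false_eq_true]
      rw [show s + d + 1 = (s + 1) + d by omega, ih (s+1) d]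

-- core correspondence after the first boundary
theorem pvEmit_specGo (rest : List String) : ∀ (pre : List String),
    pvEmitN (pre ++ rest) 0 (pvNatIdxs pre.length rest) = pvSpecGo pre rest := by
  induction rest with
  | nil => intro pre; simp [pvNatIdxs, pvEmitN, pvSpecGo]
  | cons l rest ih =>
    intro pre
    cases hb : pvIsB l with
    | true =>
      simp only [pvNatIdxs, hb, if_true, pvSpecGo]
      rw [pvEmitN]
      congr 1
      · congr 1
        simp [List.take_left']
      · rw [show pre.length + 1 = 1 + pre.length by omega, pvNatIdxs_add rest 1 pre.length]
        have h0 := pvEmit_shift (pvNatIdxs 1 rest) (pre ++ l :: rest) pre.length 0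
        rw [Nat.add_zero] at h0
        rw [h0, List.drop_left]
        have := ih [l]
        simpa using this
    | false =>
      simp only [pvNatIdxs, hb, Bool.false_eq_true, if_false, pvSpecGo]
      rw [show pre ++ l :: rest = (pre ++ [l]) ++ rest by simp,
          show pre.length + 1 = (pre ++ [l]).length by simp, ih (pre ++ [l])]

-- core correspondence for the whole body (drop the first boundary index)
theorem pvEmit_specTrue (rest : List String) : ∀ (pre : List String), (pre = [] → rest ≠ []) →
    pvEmitN (pre ++ rest) 0 ((pvNatIdxs pre.length rest).drop 1) = pvSpecTrue pre rest := by
  induction rest with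
  | nil =>
    intro pre h
    have hp : pre ≠ [] := fun hc => (h hc) rfl
    simp [pvNatIdxs, pvEmitN, pvSpecTrue, List.length_pos_iff, hp]
  | cons l rest ih =>
    intro pre _
    by_cases hb : pvIsB l
    · simp only [pvNatIdxs, hb, if_true, List.drop_succ_cons, List.drop_zero, pvSpecTrue]
      have h1 : pre ++ l :: rest = (pre ++ [l]) ++ rest := by simp
      have h2 : pre.length + 1 = (pre ++ [l]).length := by simp
      rw [h1, h2, pvEmit_specGo rest (pre ++ [l])]
    · simp only [pvNatIdxs, hb, if_false, Bool.false_eq_true, pvSpecTrue]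
      have h1 : pre ++ l :: rest = (pre ++ [l]) ++ rest := by simp
      have h2 : pre.length + 1 = (pre ++ [l]).length := by simp
      rw [h1, h2, ih (pre ++ [l]) (by simp)]

-- split("\r\n") never returns the empty list
theorem pvSplitOn_go_ne_nil (sep : List Char) :
    ∀ (fuel : Nat) (l cur : List Char) (acc : List (List Char)),
      PySem.Chars.splitOn.go sep fuel l cur acc ≠ [] := by
  intro fuel
  induction fuel with
  | zero => intro l cur acc; simp [PySem.Chars.splitOn.go]
  | succ fuel ih =>
    intro l cur acc
    cases l with
    | nil => simp [PySem.Chars.splitOn.go]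
    | cons c rest =>
      rw [PySem.Chars.splitOn.go]
      by_cases hp : sep.isPrefixOf (c :: rest) = true
      · simp only [hp, if_true]; exact ih _ _ _
      · simp only [hp, if_false, Bool.false_eq_true]; exact ih _ _ _

theorem pvLines_ne_nil (body : String) : (PySem.Str.split? body "\r\n").getD [] ≠ [] := by
  have h : PySem.Chars.split? body.toList ("\r\n".toList)
      = some (PySem.Chars.splitOn body.toList ("\r\n".toList)) := by
    simp [PySem.Chars.split?]
  have h2 := PySem.Str.split?_map body "\r\n"
  rw [h] at h2
  cases hs : PySem.Str.split? body "\r\n" with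
  | none => rw [hs] at h2; simp at h2
  | some ls =>
    rw [hs] at h2
    simp only [Option.map_some, Option.some.injEq] at h2
    have hne := pvSplitOn_go_ne_nil ("\r\n".toList) (body.toList.length + 1) body.toList [] []
    rw [show PySem.Chars.splitOn.go ("\r\n".toList) (body.toList.length + 1) body.toList [] []
        = PySem.Chars.splitOn body.toList ("\r\n".toList) from rfl] at hne
    simp only [Option.getD_some]
    intro hc
    rw [hc] at h2
    exact hne (by simpa using h2.symm)

-- ===== VERDICT (by name: the statement is the Claim_ definition above) =====
theorem split_body_pieces_spec : Claim_equal_split_body_pieces := by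
  intro body _
  unfold Spec_split_body_pieces split_body_pieces split_body_pieces_alt
  set lines := (PySem.Str.split? body "\r\n").getD [] with hl
  have hne : lines ≠ [] := pvLines_ne_nil body
  have hA : (if (lines.foldl pvAStep (true, [], [])).2.1.length > 0
        then (lines.foldl pvAStep (true, [], [])).2.2 ++ [PySem.Str.join "\r\n" (lines.foldl pvAStep (true, [], [])).2.1]
        else (lines.foldl pvAStep (true, [], [])).2.2) = pvSpecTrue [] lines := by
    have := pvA_true lines [] []
    simpa [pvFin] using this
  have hidx : (((PySem.List.enumerate lines).filter
        (fun p => PySem.Str.startswith p.2 "------=_Part_")).map (fun p => p.1))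
      = (pvNatIdxs 0 lines).map (Nat.cast) := by
    have := pvIdx_cast lines 0
    simpa [pvIsB] using this
  have hB : pvBEmit lines 0
      (PySem.List.slice (((PySem.List.enumerate lines).filter
        (fun p => PySem.Str.startswith p.2 "------=_Part_")).map (fun p => p.1)) (some 1) none)
      = pvSpecTrue [] lines := by
    rw [hidx, PySem.List.slice_from_one, ← List.map_tail, ← List.drop_one]
    have hc := pvEmit_cast ((pvNatIdxs 0 lines).drop 1) lines 0
    rw [show ((0:Nat) : Int) = (0 : Int) by simp] at hc
    rw [hc]
    have := pvEmit_specTrue lines [] (fun _ => hne)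
    simpa using this
  simp only [hA, hB]
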